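-- pv_equiv track=rewrite | github.com/mwolak07/Calculator-Course-2019 | Lesson_8.py | check_input_order
-- ===== SOURCE A (Python) =====
-- def check_input_order(input_list, operators):
--     # Starts or ends with operator
--     if input_list[0] in operators or input_list[-1] in operators:
--         return False
--
--     # Scanning for repeat operators
--     operator_flag = False
--     for term in input_list:
--         # Identified operator
--         if term in operators:
--             # Previous term was operator,
--             if operator_flag:
--                 return False
--             # Indicate operator was encountered
--             else:
--                 operator_flag = True
--         # Indicate term was not operator
--         else:
--             operator_flag = False
--
--     return True
-- ===== SOURCE B (Python) =====
-- def check_input_order(input_list, operators):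
--     # Same IndexError on empty input as the original edge check
--     if input_list[0] in operators or input_list[-1] in operators:
--         return False
--     # Collect the set of positions holding operators, then ask whether the
--     # set meets its own shift by one (i.e. two operators sit side by side).
--     ops = set(operators)
--     at = {i for i, t in enumerate(input_list) if t in ops}
--     return not (at & {i + 1 for i in at})
-- ===== Notes on version B (the rewrite author's own statement) =====
-- stated objective: alternative
-- what changed: Instead of scanning with a running operator_flag, B builds the set of operator positions once and rejects iff that index set intersects its own shift by one (adjacency as set intersection), after the same edge check.
import Mathlib
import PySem

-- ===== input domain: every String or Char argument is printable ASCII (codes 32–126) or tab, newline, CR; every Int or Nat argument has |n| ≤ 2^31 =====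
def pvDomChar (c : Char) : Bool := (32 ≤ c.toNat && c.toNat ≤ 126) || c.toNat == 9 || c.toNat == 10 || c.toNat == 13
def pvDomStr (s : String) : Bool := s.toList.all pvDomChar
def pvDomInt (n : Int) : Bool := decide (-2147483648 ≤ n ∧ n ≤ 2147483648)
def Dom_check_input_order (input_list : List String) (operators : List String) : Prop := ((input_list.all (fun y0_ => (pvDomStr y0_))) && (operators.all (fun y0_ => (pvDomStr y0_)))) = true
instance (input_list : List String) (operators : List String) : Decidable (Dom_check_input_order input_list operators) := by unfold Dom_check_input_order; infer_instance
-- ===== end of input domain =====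

-- B replaces A's stateful operator_flag scan by building the set of operator positions once
-- and testing whether it intersects its own shift by one (alternative formulation, same asymptotic cost).

-- ===== PORT A =====
-- the 'for term in input_list' loop with the operator_flag accumulator; returns false on a repeat operator
def checkLoopA (operators : List String) : List String → Bool → Bool
  | [], _ => true
  | term :: rest, operator_flag =>
    if operators.contains term then
      if operator_flag then false
      else checkLoopA operators rest true
    else checkLoopA operators rest false

def check_input_order (input_list : List String) (operators : List String) : Bool :=
  -- input_list[0] / input_list[-1]: IndexError (none) on the empty list, excluded by Pre_
  match PySem.List.pyGet? input_list 0, PySem.List.pyGet? input_list (-1) with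
  | some first, some last =>
    if operators.contains first || operators.contains last then false
    else checkLoopA operators input_list false
  | _, _ => false

-- ===== PORT B =====
def check_input_order_alt (input_list : List String) (operators : List String) : Bool :=
  match PySem.List.pyGet? input_list 0 with
  | none => false
  | some first =>
  match PySem.List.pyGet? input_list (-1) with
  | none => false
  | some last =>
    if operators.contains first || operators.contains last then false
    else
      -- ops = set(operators); at = {i for i, t in enumerate(input_list) if t in ops}
      let ops : PySem.Set String := PySem.Set.ofList operators
      let at_ : PySem.Set Int := PySem.Set.ofList
        (((PySem.List.enumerate input_list 0).filter
            (fun p => PySem.Set.contains ops p.2)).map (fun p => p.1))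
      -- return not (at & {i + 1 for i in at})   (a set is falsy iff empty)
      (PySem.Set.inter at_ (PySem.Set.ofList (at_.map (fun i => i + 1)))).isEmpty

-- ===== PRECONDITION & SPEC =====
-- Pre_ excludes only the empty list, on which A raises IndexError at input_list[0].
def Pre_check_input_order (input_list : List String) (operators : List String) : Prop :=
  input_list ≠ []
instance (input_list : List String) (operators : List String) : Decidable (Pre_check_input_order input_list operators) := by unfold Pre_check_input_order; infer_instance
def pvWitness_check_input_order : List String × List String := (["1", "+", "2"], ["+", "-"])

def Spec_check_input_order (input_list : List String) (operators : List String) (out : Bool) : Prop := out = check_input_order_alt input_list operators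
instance (input_list : List String) (operators : List String) (out : Bool) : Decidable (Spec_check_input_order input_list operators out) := by unfold Spec_check_input_order; infer_instance

-- ===== CLAIM (what is proved, stated in full; the proofs are below) =====
def Claim_equal_check_input_order : Prop := ∀ (input_list : List String) (operators : List String), Dom_check_input_order input_list operators → Pre_check_input_order input_list operators → Spec_check_input_order input_list operators (check_input_order input_list operators)

-- ===== LEMMAS AND PROOFS =====

-- "some adjacent pair of operators", as an index proposition
def AdjOps (xs operators : List String) : Prop :=
  ∃ k : Nat, ∃ _h : k + 1 < xs.length, xs[k] ∈ operators ∧ xs[k + 1] ∈ operators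

theorem adjOps_cons (t : String) (rest operators : List String) :
    AdjOps (t :: rest) operators ↔
      (t ∈ operators ∧ ∃ _h : 0 < rest.length, rest[0] ∈ operators) ∨ AdjOps rest operators := by
  unfold AdjOps
  constructor
  · rintro ⟨k, hk, h1, h2⟩
    cases k with
    | zero =>
      left
      refine ⟨h1, by simpa using hk, ?_⟩
      simpa using h2
    | succ k' =>
      right
      exact ⟨k', by simpa using hk, by simpa using h1, by simpa using h2⟩
  · rintro (⟨h1, hr, h2⟩ | ⟨k, hk, h1, h2⟩)
    · exact ⟨0, by simpa using hr, by simpa using h1, by simpa using h2⟩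
    · exact ⟨k + 1, by simpa using hk, by simpa using h1, by simpa using h2⟩

-- A's flag loop returns True iff no adjacent operator pair and no (flag-and-head-operator)
theorem checkLoopA_true_iff (operators : List String) :
    ∀ (xs : List String) (flag : Bool),
      checkLoopA operators xs flag = true ↔
        (¬ AdjOps xs operators ∧
         ¬(flag = true ∧ ∃ _h : 0 < xs.length, xs[0] ∈ operators)) := by
  intro xs
  induction xs with
  | nil => intro flag; simp [checkLoopA, AdjOps]
  | cons t rest ih =>
    intro flag
    by_cases ht : t ∈ operators
    · cases flag with
      | true => simp [checkLoopA, ht]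
      | false =>
        rw [show checkLoopA operators (t :: rest) false = checkLoopA operators rest true by
              simp [checkLoopA, ht], ih true, adjOps_cons]
        simp [ht]
        tauto
    · rw [show checkLoopA operators (t :: rest) flag = checkLoopA operators rest false by
            simp [checkLoopA, ht], ih false, adjOps_cons]
      cases flag <;> simp [ht]

-- membership in B's position set
theorem mem_at_iff (xs operators : List String) (i : Int) :
    (i ∈ PySem.Set.ofList
        (((PySem.List.enumerate xs 0).filter
            (fun p => PySem.Set.contains (PySem.Set.ofList operators) p.2)).map (fun p => p.1))) ↔
      ∃ k : Nat, ∃ _h : k < xs.length, i = (k : Int) ∧ xs[k] ∈ operators := by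
  simp only [PySem.Set.mem_ofList, List.mem_map, List.mem_filter,
    PySem.List.mem_enumerate_iff, PySem.Set.contains_iff]
  constructor
  · rintro ⟨p, ⟨⟨k, hk, rfl⟩, hop⟩, rfl⟩
    exact ⟨k, hk, by simp, by simpa using hop⟩
  · rintro ⟨k, hk, rfl, hop⟩
    exact ⟨((k : Int), xs[k]), ⟨⟨k, hk, by simp⟩, by simpa using hop⟩, rfl⟩

-- B's intersection is empty iff no adjacent operator pair exists
theorem inter_isEmpty_iff (xs operators : List String) :
    ((PySem.Set.inter
        (PySem.Set.ofList
          (((PySem.List.enumerate xs 0).filter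
              (fun p => PySem.Set.contains (PySem.Set.ofList operators) p.2)).map (fun p => p.1)))
        (PySem.Set.ofList
          ((PySem.Set.ofList
            (((PySem.List.enumerate xs 0).filter
                (fun p => PySem.Set.contains (PySem.Set.ofList operators) p.2)).map (fun p => p.1))).map
            (fun i => i + 1)))).isEmpty = true) ↔ ¬ AdjOps xs operators := by
  rw [List.isEmpty_iff, List.eq_nil_iff_forall_not_mem]
  constructor
  · intro hemp hadj
    obtain ⟨k, hk, h1, h2⟩ := hadj
    apply hemp ((k : Int) + 1)
    rw [PySem.Set.mem_inter]
    constructor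
    · rw [mem_at_iff]
      exact ⟨k + 1, hk, by push_cast; ring, h2⟩
    · rw [PySem.Set.mem_ofList]
      refine List.mem_map.mpr ⟨(k : Int), ?_, rfl⟩
      rw [mem_at_iff]
      exact ⟨k, by omega, rfl, h1⟩
  · intro hno i hmem
    rw [PySem.Set.mem_inter] at hmem
    obtain ⟨hin, hshift⟩ := hmem
    rw [PySem.Set.mem_ofList] at hshift
    obtain ⟨j, hj, rfl⟩ := List.mem_map.mp hshift
    rw [mem_at_iff] at hin hj
    obtain ⟨k1, hk1, hke, hop1⟩ := hin
    obtain ⟨k0, hk0, rfl, hop0⟩ := hj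
    have : k1 = k0 + 1 := by omega
    subst this
    exact hno ⟨k0, by omega, hop0, hop1⟩

-- ===== VERDICT (by name: the statement is the Claim_ definition above) =====
theorem check_input_order_spec : Claim_equal_check_input_order := by
  intro input_list operators _ hpre
  unfold Spec_check_input_order check_input_order check_input_order_alt
  cases hg0 : PySem.List.pyGet? input_list 0 with
  | none => rfl
  | some first =>
    cases hg1 : PySem.List.pyGet? input_list (-1) with
    | none => rfl
    | some last =>
      by_cases hedge : (operators.contains first || operators.contains last) = true
      · simp only [hedge, if_true]
      · simp only [hedge, Bool.false_eq_true, if_false]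
        rw [Bool.eq_iff_iff, checkLoopA_true_iff, inter_isEmpty_iff]
        cases input_list with
        | nil => exact absurd rfl hpre
        | cons x t => simp
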